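-- pv_equiv track=rewrite | github.com/wrenoud/aoc2019 | day_17.py | compute_alignment
-- ===== SOURCE A (Python) =====
-- def compute_alignment(video):
-- 	alignment = 0
-- 	for i in range(1,len(video)-2):
-- 		for j in range(1,len(video[i])-2):
-- 			if video[i][j] == "#":
-- 				if video[i-1][j] == "#" and video[i+1][j] == "#" and video[i][j-1] == "#" and video[i][j+1] == "#":
-- 					alignment += i * j
-- 	return alignment
-- ===== SOURCE B (Python) =====
-- def compute_alignment(video):
--     # Staged pattern search: every horizontal "###" window in a row centers a
--     # candidate intersection at (i, start+1); keep the candidates whose vertical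
--     # neighbours are '#' as well.  Covers all interior cells (natural -1 bounds).
--     total = 0
--     for i in range(1, len(video) - 1):
--         row = video[i]
--         above, below = video[i - 1], video[i + 1]
--         start = row.find("###")
--         while start != -1:
--             j = start + 1
--             if j < len(above) and above[j] == "#" and j < len(below) and below[j] == "#":
--                 total += i * j
--             start = row.find("###", start + 1)
--     return total
-- ===== Notes on version B (the rewrite author's own statement) =====
-- stated objective: alternative
-- what changed: B replaces A's per-cell nested index scan by a staged substring search: each row is scanned with str.find for overlapping '###' windows whose centre is a candidate intersection, then only the candidates' vertical neighbours are checked; B also covers all interior cells (natural -1 bounds), fixing A's off-by-one -2 loop bounds.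
-- intended difference: On grids with an intersection in the second-to-last row or in the second-to-last column of its row, A's range(1, len-2) loop bounds silently skip it, so A returns a sum missing those i*j terms; B returns the full sum over all intersections, which is the intended alignment value. — e.g. on compute_alignment([".....", "..#..", ".###.", "..#.."]): A returns 0, B returns 4
import Mathlib
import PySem

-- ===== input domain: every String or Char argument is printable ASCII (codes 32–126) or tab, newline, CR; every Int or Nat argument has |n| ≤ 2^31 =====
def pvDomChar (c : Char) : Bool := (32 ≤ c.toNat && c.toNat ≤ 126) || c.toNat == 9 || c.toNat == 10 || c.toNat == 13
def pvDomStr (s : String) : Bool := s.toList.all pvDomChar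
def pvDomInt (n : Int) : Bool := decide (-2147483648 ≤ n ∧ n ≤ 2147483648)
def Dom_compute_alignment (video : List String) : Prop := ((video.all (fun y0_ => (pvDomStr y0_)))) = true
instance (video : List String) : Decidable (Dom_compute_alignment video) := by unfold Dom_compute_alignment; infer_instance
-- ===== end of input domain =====

-- B finds intersections by substring search: every horizontal "###" window centres a
-- candidate, kept when its vertical neighbours are '#'; B covers all interior cells
-- (natural -1 bounds), fixing A's off-by-one -2 bounds (see D_ below); objective: alternative.

-- ===== PORT A =====
def compute_alignment (video : List String) : Int :=
  (PySem.List.pyRange 1 (PySem.List.len video - 2) 1).foldl (fun alignment i =>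
    (PySem.List.pyRange 1 (PySem.Str.len (PySem.List.pyGetD video i "") - 2) 1).foldl
      (fun alignment j =>
        if (PySem.Str.pyGet? (PySem.List.pyGetD video i "") j).getD ' ' = '#' then
          if (PySem.Str.pyGet? (PySem.List.pyGetD video (i - 1) "") j).getD ' ' = '#' ∧
             (PySem.Str.pyGet? (PySem.List.pyGetD video (i + 1) "") j).getD ' ' = '#' ∧
             (PySem.Str.pyGet? (PySem.List.pyGetD video i "") (j - 1)).getD ' ' = '#' ∧
             (PySem.Str.pyGet? (PySem.List.pyGetD video i "") (j + 1)).getD ' ' = '#'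
          then alignment + i * j else alignment
        else alignment)
      alignment) 0

-- ===== PORT B =====
-- the 'while start != -1' loop of Source B; fuel (row.length + 1) only makes the recursion
-- structural, it is never exhausted (each find result is strictly larger than the last)
def pvScanRow (row above below : List Char) (i : Int) : Nat → Int → Int → Int
  | 0, _, total => total
  | fuel + 1, start, total =>
    if start = -1 then total
    else
      pvScanRow row above below i fuel
        (PySem.Chars.findFrom row "###".toList (start + 1))
        (if start + 1 < (above.length : Int) ∧
            (PySem.Chars.pyGet? above (start + 1)).getD ' ' = '#' ∧
            start + 1 < (below.length : Int) ∧
            (PySem.Chars.pyGet? below (start + 1)).getD ' ' = '#'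
         then total + i * (start + 1) else total)

def compute_alignment_alt (video : List String) : Int :=
  (PySem.List.pyRange 1 (PySem.List.len video - 1) 1).foldl (fun total i =>
    let row := (PySem.List.pyGetD video i "").toList
    let above := (PySem.List.pyGetD video (i - 1) "").toList
    let below := (PySem.List.pyGetD video (i + 1) "").toList
    pvScanRow row above below i (row.length + 1) (PySem.Chars.find row "###".toList) total) 0

-- ===== PRECONDITION & SPEC =====
-- Pre_ excludes exactly the inputs on which A raises IndexError: a scanned '#' cell whose
-- row above is too short to be indexed, or whose row above has '#' there while the row
-- below is too short to be indexed.
def Pre_compute_alignment (video : List String) : Prop :=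
  ∀ i ∈ List.range video.length, ∀ j ∈ List.range (video.getD i "").toList.length,
    (1 ≤ i ∧ i + 2 < video.length ∧ 1 ≤ j ∧ j + 2 < (video.getD i "").toList.length ∧
     (video.getD i "").toList.getD j ' ' = '#') →
      j < (video.getD (i - 1) "").toList.length ∧
      ((video.getD (i - 1) "").toList.getD j ' ' = '#' →
        j < (video.getD (i + 1) "").toList.length)
instance (video : List String) : Decidable (Pre_compute_alignment video) := by
  unfold Pre_compute_alignment; infer_instance

def pvWitness_compute_alignment : List String :=
  [".....", "..#..", ".###.", "..#..", "....."]

-- On grids with an intersection in the second-to-last row or second-to-last column of its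
-- row, A's off-by-one loop bounds (range stops at len-2 instead of len-1) silently skip
-- that intersection, so A returns a sum missing those i*j terms, while B returns the full
-- sum over all intersections, which is the intended alignment value.
def D_compute_alignment (video : List String) : Prop :=
  ∃ i < video.length, ∃ j < (video.getD i "").toList.length, 0 < i ∧ 0 < j ∧
    (video.length ≤ i + 2 ∨ (video.getD i "").toList.length ≤ j + 2) ∧
    "###".toList <+: (video.getD i "").toList.drop (j - 1) ∧
    "###".toList <+: (video.map (fun s => s.toList.getD j ' ')).drop (i - 1)
instance (video : List String) : Decidable (D_compute_alignment video) := by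
  unfold D_compute_alignment; infer_instance

def Spec_compute_alignment (video : List String) (out : Int) : Prop :=
  ¬ D_compute_alignment video → out = compute_alignment_alt video
instance (video : List String) (out : Int) : Decidable (Spec_compute_alignment video out) := by
  unfold Spec_compute_alignment; infer_instance

def pvDiffWitness_compute_alignment : List String :=
  [".....", "..#..", ".###.", "..#.."]
def pvDiffWitnessOut_compute_alignment : Int × Int := (0, 4)

-- ===== CLAIM (what is proved, stated in full; the proofs are below) =====
def Claim_unchanged_compute_alignment : Prop := ∀ (video : List String), Dom_compute_alignment video → Pre_compute_alignment video → Spec_compute_alignment video (compute_alignment video)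
def Claim_changed_compute_alignment : Prop := Dom_compute_alignment (pvDiffWitness_compute_alignment) ∧ Pre_compute_alignment (pvDiffWitness_compute_alignment) ∧ D_compute_alignment (pvDiffWitness_compute_alignment) ∧ compute_alignment (pvDiffWitness_compute_alignment) = pvDiffWitnessOut_compute_alignment.1 ∧ compute_alignment_alt (pvDiffWitness_compute_alignment) = pvDiffWitnessOut_compute_alignment.2 ∧ pvDiffWitnessOut_compute_alignment.1 ≠ pvDiffWitnessOut_compute_alignment.2
def Claim_exact_compute_alignment : Prop := ∀ (video : List String), Dom_compute_alignment video → Pre_compute_alignment video → D_compute_alignment video → compute_alignment video ≠ compute_alignment_alt video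

-- ===== LEMMAS AND PROOFS =====

-- row i of the grid as characters
def pvRow (video : List String) (i : Nat) : List Char := (video.getD i "").toList
-- "cell (i, j) is on the scaffold" (out of range reads as blank)
abbrev pvC (video : List String) (i j : Nat) : Prop := (pvRow video i).getD j ' ' = '#'
-- "cell (i, j) is an intersection", with the natural interior bounds (i+1, j+1 in range)
abbrev pvCondN (video : List String) (i j : Nat) : Prop :=
  1 ≤ i ∧ i + 1 < video.length ∧ 1 ≤ j ∧ j + 1 < (pvRow video i).length ∧
  pvC video i j ∧ pvC video (i - 1) j ∧ pvC video (i + 1) j ∧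
  pvC video i (j - 1) ∧ pvC video i (j + 1)

-- the condition under which a cell contributes in A (A's -2 bounds)
abbrev pvCond (video : List String) (i j : Nat) : Prop :=
  1 ≤ i ∧ i + 2 < video.length ∧ 1 ≤ j ∧ j + 2 < (pvRow video i).length ∧
  pvC video i j ∧ pvC video (i - 1) j ∧ pvC video (i + 1) j ∧
  pvC video i (j - 1) ∧ pvC video i (j + 1)

def pvG (video : List String) (i j : Nat) : Int :=
  if pvCond video i j then (i : Int) * (j : Int) else 0

def pvG' (video : List String) (i j : Nat) : Int :=
  if pvCondN video i j then (i : Int) * (j : Int) else 0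

def pvS (video : List String) : Int :=
  ((List.range video.length).map (fun i =>
    ((List.range (pvRow video i).length).map (fun j => pvG video i j)).sum)).sum

def pvS' (video : List String) : Int :=
  ((List.range video.length).map (fun i =>
    ((List.range (pvRow video i).length).map (fun j => pvG' video i j)).sum)).sum

theorem pv_foldl_add {α : Type} (l : List α) (f : α → Int) (init : Int) :
    l.foldl (fun a x => a + f x) init = init + (l.map f).sum := by
  induction l generalizing init with
  | nil => simp
  | cons x xs ih => simp only [List.foldl_cons, List.map_cons, List.sum_cons, ih]; ring

theorem pv_foldl_if_if_add {α : Type} (l : List α) (c1 c2 : α → Prop)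
    [DecidablePred c1] [DecidablePred c2] (f : α → Int) (init : Int) :
    l.foldl (fun a x => if c1 x then (if c2 x then a + f x else a) else a) init
      = init + (l.map (fun x => if c1 x ∧ c2 x then f x else 0)).sum := by
  induction l generalizing init with
  | nil => simp
  | cons x xs ih =>
    simp only [List.foldl_cons, List.map_cons, List.sum_cons, ih]
    split_ifs <;> first | (exfalso; tauto) | ring

theorem pv_sum_range_shift (F : Nat → Int) (n : Nat) (h0 : F 0 = 0)
    (htail : ∀ i, n - 2 ≤ i → F i = 0) :
    ((List.range n).map F).sum = ((List.range (n - 3)).map (fun k => F (k + 1))).sum := by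
  rcases Nat.lt_or_ge n 3 with h | h
  · have h3 : n - 3 = 0 := by omega
    rw [h3]
    simp only [List.range_zero, List.map_nil, List.sum_nil]
    apply List.sum_eq_zero
    intro x hx
    simp only [List.mem_map, List.mem_range] at hx
    obtain ⟨i, hi, rfl⟩ := hx
    rcases Nat.eq_zero_or_pos i with rfl | hp
    · exact h0
    · exact htail i (by omega)
  · have hn : n = (n - 2) + 2 := by omega
    rw [hn, List.range_add, List.map_append, List.sum_append]
    have hz : ((List.map (fun x => n - 2 + x) (List.range 2)).map F).sum = 0 := by
      apply List.sum_eq_zero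
      intro x hx
      simp only [List.map_map, List.mem_map, List.mem_range, Function.comp] at hx
      obtain ⟨k, _, rfl⟩ := hx
      exact htail _ (by omega)
    rw [hz, add_zero]
    have h2 : n - 2 = (n - 3) + 1 := by omega
    rw [h2, List.range_succ_eq_map, List.map_cons, List.sum_cons, h0, zero_add,
      List.map_map]
    rfl

-- the -1-bounds analogue: drop a zero first term and a zero last term
theorem pv_sum_range_shift1 (F : Nat → Int) (n : Nat) (h0 : F 0 = 0)
    (htail : ∀ i, n - 1 ≤ i → F i = 0) :
    ((List.range n).map F).sum = ((List.range (n - 2)).map (fun k => F (k + 1))).sum := by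
  rcases Nat.lt_or_ge n 2 with h | h
  · have h2 : n - 2 = 0 := by omega
    rw [h2]
    simp only [List.range_zero, List.map_nil, List.sum_nil]
    apply List.sum_eq_zero
    intro x hx
    simp only [List.mem_map, List.mem_range] at hx
    obtain ⟨i, hi, rfl⟩ := hx
    rcases Nat.eq_zero_or_pos i with rfl | hp
    · exact h0
    · exact htail i (by omega)
  · have hn : n = (n - 1) + 1 := by omega
    rw [hn, List.range_add, List.map_append, List.sum_append]
    have hz : ((List.map (fun x => n - 1 + x) (List.range 1)).map F).sum = 0 := by
      apply List.sum_eq_zero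
      intro x hx
      simp only [List.map_map, List.mem_map, List.mem_range, Function.comp] at hx
      obtain ⟨k, _, rfl⟩ := hx
      exact htail _ (by omega)
    rw [hz, add_zero]
    have h2 : n - 1 = (n - 2) + 1 := by omega
    rw [h2, List.range_succ_eq_map, List.map_cons, List.sum_cons, h0, zero_add,
      List.map_map]
    rfl

-- drop an all-zero tail of a range sum
theorem pv_sum_range_trunc (F : Nat → Int) (n m : Nat) (hmn : m ≤ n)
    (hz : ∀ t, m ≤ t → F t = 0) :
    ((List.range n).map F).sum = ((List.range m).map F).sum := by
  have h : n = m + (n - m) := by omega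
  rw [h, List.range_add, List.map_append, List.sum_append]
  have : ((List.map (fun x => m + x) (List.range (n - m))).map F).sum = 0 := by
    apply List.sum_eq_zero
    intro x hx
    simp only [List.map_map, List.mem_map, List.mem_range, Function.comp] at hx
    obtain ⟨k, _, rfl⟩ := hx
    exact hz _ (by omega)
  rw [this, add_zero]

theorem pv_char_getD (video : List String) (i j : Nat) :
    ((PySem.Str.pyGet? (video.getD i "") (j : Int)).getD ' ' = '#') ↔ pvC video i j := by
  simp [pvC, pvRow, List.getD]

theorem pv_G_zero_row (video : List String) (i j : Nat) (h : i = 0 ∨ video.length - 2 ≤ i) :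
    pvG video i j = 0 := by
  unfold pvG
  refine if_neg (fun hC => ?_)
  obtain ⟨h1, h2, _⟩ := hC
  omega

theorem pv_G_zero_col (video : List String) (i j : Nat)
    (h : j = 0 ∨ (pvRow video i).length - 2 ≤ j) : pvG video i j = 0 := by
  unfold pvG
  refine if_neg (fun hC => ?_)
  obtain ⟨_, _, h3, h4, _⟩ := hC
  omega

theorem pv_A_eq_S (video : List String) : compute_alignment video = pvS video := by
  unfold compute_alignment
  rw [PySem.List.len_eq, PySem.List.pyRange_one,
    show ((video.length : Int) - 2 - 1).toNat = video.length - 3 from by omega,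
    List.foldl_map]
  simp only [pv_foldl_if_if_add]
  rw [pv_foldl_add, zero_add]
  unfold pvS
  rw [pv_sum_range_shift _ video.length
    (List.sum_eq_zero (fun x hx => by
      simp only [List.mem_map] at hx
      obtain ⟨j, _, rfl⟩ := hx
      exact pv_G_zero_row video 0 j (Or.inl rfl)))
    (fun i hi => List.sum_eq_zero (fun x hx => by
      simp only [List.mem_map] at hx
      obtain ⟨j, _, rfl⟩ := hx
      exact pv_G_zero_row video i j (Or.inr hi)))]
  refine congrArg _ (List.map_congr_left ?_)
  intro k hk
  rw [List.mem_range] at hk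
  rw [show (1 + (k : Int)) = (((k + 1 : Nat)) : Int) from by omega]
  simp only [PySem.List.pyGetD_natCast, PySem.Str.len_eq]
  rw [PySem.List.pyRange_one,
    show (((video.getD (k+1) "").toList.length : Int) - 2 - 1).toNat
        = (video.getD (k+1) "").toList.length - 3 from by omega,
    List.map_map]
  rw [pv_sum_range_shift (fun j => pvG video (k+1) j) (pvRow video (k+1)).length
    (pv_G_zero_col video (k+1) 0 (Or.inl rfl))
    (fun j hj => pv_G_zero_col video (k+1) j (Or.inr hj))]
  unfold pvRow
  refine congrArg _ (List.map_congr_left ?_)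
  intro j hj
  rw [List.mem_range] at hj
  simp only [Function.comp_def]
  rw [show (1 + (j : Int)) = (((j + 1 : Nat)) : Int) from by omega,
    show (((k + 1 : Nat)) : Int) - 1 = ((k : Nat) : Int) from by omega,
    show (((k + 1 : Nat)) : Int) + 1 = (((k + 2 : Nat)) : Int) from by omega,
    show (((j + 1 : Nat)) : Int) - 1 = ((j : Nat) : Int) from by omega,
    show (((j + 1 : Nat)) : Int) + 1 = (((j + 2 : Nat)) : Int) from by omega]
  simp only [PySem.List.pyGetD_natCast]
  unfold pvG
  by_cases hB : pvCond video (k + 1) (j + 1)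
  · rw [if_pos ?_, if_pos hB]
    obtain ⟨_, _, _, _, c5, c6, c7, c8, c9⟩ := hB
    exact ⟨(pv_char_getD video (k+1) (j+1)).mpr c5,
      (pv_char_getD video k (j+1)).mpr (by simpa using c6),
      (pv_char_getD video (k+2) (j+1)).mpr (by simpa using c7),
      (pv_char_getD video (k+1) j).mpr (by simpa using c8),
      (pv_char_getD video (k+1) (j+2)).mpr (by simpa using c9)⟩
  · rw [if_neg ?_, if_neg hB]
    rintro ⟨a1, a2, a3, a4, a5⟩
    refine hB ⟨by omega, by omega, by omega, by
        have : j < (video.getD (k+1) "").toList.length - 3 := hj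
        unfold pvRow
        omega, (pv_char_getD video (k+1) (j+1)).mp a1,
      by simpa using (pv_char_getD video k (j+1)).mp a2,
      by simpa using (pv_char_getD video (k+2) (j+1)).mp a3,
      by simpa using (pv_char_getD video (k+1) j).mp a4,
      by simpa using (pv_char_getD video (k+1) (j+2)).mp a5⟩

-- ========== B side ==========

-- occurrence of "###" at position p, in terms of getD reads
theorem pv_occ_aux (l : List Char) :
    (['#','#','#'] <+: l) ↔
      (2 < l.length ∧ l.getD 0 ' ' = '#' ∧ l.getD 1 ' ' = '#' ∧ l.getD 2 ' ' = '#') := by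
  match l with
  | [] => simp
  | [a] => simp [List.cons_prefix_cons]
  | [a, b] => simp [List.cons_prefix_cons]
  | a :: b :: c :: t =>
    simp only [List.cons_prefix_cons, List.nil_prefix, and_true, List.length_cons,
      List.getD, List.getElem?_cons_zero, List.getElem?_cons_succ, Option.getD_some]
    constructor
    · rintro ⟨rfl, rfl, rfl⟩; exact ⟨by omega, rfl, rfl, rfl⟩
    · rintro ⟨_, rfl, rfl, rfl⟩; exact ⟨rfl, rfl, rfl⟩

theorem pv_occ_iff (row : List Char) (p : Nat) :
    ("###".toList <+: row.drop p) ↔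
      (p + 2 < row.length ∧ row.getD p ' ' = '#' ∧
       row.getD (p+1) ' ' = '#' ∧ row.getD (p+2) ' ' = '#') := by
  have hsub : "###".toList = ['#','#','#'] := rfl
  rw [hsub, pv_occ_aux]
  have hget : ∀ t : Nat, (row.drop p).getD t ' ' = row.getD (p + t) ' ' := by
    intro t
    simp [List.getD, List.getElem?_drop]
  rw [List.length_drop, hget 0, hget 1, hget 2]
  constructor
  · rintro ⟨h, h0, h1, h2⟩
    exact ⟨by omega, by simpa using h0, h1, h2⟩
  · rintro ⟨h, h0, h1, h2⟩
    exact ⟨by omega, by simpa using h0, h1, h2⟩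

-- the vertical-neighbour test of Source B in terms of getD reads
theorem pv_vert_iff (l : List Char) (j : Nat) :
    (((j : Int) < (l.length : Int) ∧ (PySem.Chars.pyGet? l (j : Int)).getD ' ' = '#')
      ↔ l.getD j ' ' = '#') := by
  by_cases h : j < l.length
  · simp [PySem.Chars.pyGet?, PySem.List.pyGet?, PySem.List.pyIdx?, List.getD, h]
  · constructor
    · intro hc
      exact absurd (by exact_mod_cast hc.1 : j < l.length) h
    · intro hc
      rw [List.getD_eq_default _ _ (by omega)] at hc
      simp at hc

-- contribution of an occurrence starting at p in row i (as scanned by Source B)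
def pvF (video : List String) (i : Nat) (p : Nat) : Int :=
  if ("###".toList <+: (pvRow video i).drop p) ∧
     (pvRow video (i-1)).getD (p+1) ' ' = '#' ∧ (pvRow video (i+1)).getD (p+1) ' ' = '#'
  then (i : Int) * ((p : Int) + 1) else 0

theorem pv_prefix_drop_infix {sub l : List Char} {t : Nat} (h : sub <+: l.drop t) :
    sub <:+: l := by
  obtain ⟨t2, ht⟩ := h
  obtain ⟨s1, hs⟩ := List.drop_suffix t l
  exact ⟨s1, t2, by rw [List.append_assoc, ht, hs]⟩

theorem pv_sum_range_peel (F : Nat → Int) (a len : Nat) (h : a < len) :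
    ((List.range (len - a)).map (fun t => F (a + t))).sum
      = F a + ((List.range (len - (a + 1))).map (fun t => F (a + 1 + t))).sum := by
  rw [show len - a = (len - (a + 1)) + 1 from by omega, List.range_succ_eq_map,
    List.map_cons, List.sum_cons, List.map_map]
  simp only [Function.comp_def, Nat.add_zero]
  congr 1
  refine congrArg _ (List.map_congr_left ?_)
  intro t _
  exact congrArg F (by omega)

theorem pv_sum_range_split (F : Nat → Int) (a M len : Nat) (haM : a ≤ M) (hM : M < len)
    (hzero : ∀ p, a ≤ p → p < M → F p = 0) :
    ((List.range (len - a)).map (fun t => F (a + t))).sum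
      = F M + ((List.range (len - (M + 1))).map (fun t => F (M + 1 + t))).sum := by
  induction hd : M - a generalizing a with
  | zero =>
    have ha : a = M := by omega
    subst ha
    exact pv_sum_range_peel F a len hM
  | succ n ihn =>
    rw [pv_sum_range_peel F a len (by omega), hzero a le_rfl (by omega), zero_add]
    exact ihn (a + 1) (by omega) (fun p h1 h2 => hzero p (by omega) h2) (by omega)

-- the while loop from frontier k sums pvF over [k, row.length)
theorem pvScanRow_eq (video : List String) (i : Nat) :
    ∀ (n k : Nat) (total : Int), k ≤ (pvRow video i).length →
      (pvRow video i).length - k < n →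
      pvScanRow (pvRow video i) (pvRow video (i-1)) (pvRow video (i+1)) (i : Int) n
          (PySem.Chars.findFrom (pvRow video i) "###".toList (k : Int)) total
        = total + ((List.range ((pvRow video i).length - k)).map
            (fun t => pvF video i (k + t))).sum := by
  intro n
  induction n with
  | zero => intro k total hk hn; omega
  | succ m ih =>
    intro k total hk hn
    by_cases hneg : PySem.Chars.findFrom (pvRow video i) "###".toList (k : Int) = -1
    · rw [hneg]
      unfold pvScanRow
      rw [if_pos rfl]
      have hno : ¬ "###".toList <:+: (pvRow video i).drop k :=
        (PySem.Chars.findFrom_natCast_eq_neg_one_iff _ _ k hk).mp hneg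
      have hz : ((List.range ((pvRow video i).length - k)).map
          (fun t => pvF video i (k + t))).sum = 0 := by
        apply List.sum_eq_zero
        intro x hx
        simp only [List.mem_map, List.mem_range] at hx
        obtain ⟨t, _, rfl⟩ := hx
        unfold pvF
        refine if_neg (fun hcc => ?_)
        have h2 : ((pvRow video i).drop k).drop t = (pvRow video i).drop (k + t) := by
          rw [List.drop_drop]
        exact hno (pv_prefix_drop_infix (h2 ▸ hcc.1))
      rw [hz, add_zero]
    · obtain ⟨hge, hocc, hmin⟩ :=
        PySem.Chars.findFrom_natCast_spec (pvRow video i) "###".toList k hk hneg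
      set sI := PySem.Chars.findFrom (pvRow video i) "###".toList (k : Int) with hsI
      have hs0 : 0 ≤ sI := le_trans (by exact_mod_cast Nat.zero_le k) hge
      set M := sI.toNat with hM
      have hkM : k ≤ M := by omega
      have hlen : M + 2 < (pvRow video i).length := by
        have := (pv_occ_iff (pvRow video i) M).mp hocc
        omega
      have hscast : sI = (M : Int) := by omega
      -- unfold one loop step
      conv_lhs => rw [pvScanRow]
      rw [if_neg hneg]
      have hsucc : sI + 1 = ((M + 1 : Nat) : Int) := by omega
      rw [hsucc]
      rw [ih (M + 1) _ (by omega) (by omega)]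
      -- identify the conditional increment with pvF at M
      have hstep :
          (if ((M+1 : Nat) : Int) < ((pvRow video (i-1)).length : Int) ∧
              (PySem.Chars.pyGet? (pvRow video (i-1)) ((M+1 : Nat) : Int)).getD ' ' = '#' ∧
              ((M+1 : Nat) : Int) < ((pvRow video (i+1)).length : Int) ∧
              (PySem.Chars.pyGet? (pvRow video (i+1)) ((M+1 : Nat) : Int)).getD ' ' = '#'
           then total + (i : Int) * (((M+1 : Nat)) : Int) else total)
            = total + pvF video i M := by
        unfold pvF
        by_cases hv : (pvRow video (i-1)).getD (M+1) ' ' = '#' ∧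
            (pvRow video (i+1)).getD (M+1) ' ' = '#'
        · rw [if_pos ⟨((pv_vert_iff _ (M+1)).mpr hv.1).1, ((pv_vert_iff _ (M+1)).mpr hv.1).2,
              ((pv_vert_iff _ (M+1)).mpr hv.2).1, ((pv_vert_iff _ (M+1)).mpr hv.2).2⟩,
            if_pos ⟨hocc, hv⟩]
          push_cast
          ring
        · rw [if_neg ?_, if_neg (fun hc => hv ⟨hc.2.1, hc.2.2⟩), add_zero]
          rintro ⟨b1, b2, b3, b4⟩
          exact hv ⟨(pv_vert_iff _ (M+1)).mp ⟨b1, b2⟩, (pv_vert_iff _ (M+1)).mp ⟨b3, b4⟩⟩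
      rw [show (sI + 1) = ((M + 1 : Nat) : Int) from hsucc] at *
      rw [hstep]
      -- sum over [k, len) = zeros on [k, M) + term at M + sum over [M+1, len)
      have hzero : ∀ t, k ≤ t → t < M → pvF video i t = 0 := by
        intro t h1 h2
        unfold pvF
        exact if_neg (fun hc => hmin t h1 h2 hc.1)
      have hsplit :
          ((List.range ((pvRow video i).length - k)).map (fun t => pvF video i (k + t))).sum
            = pvF video i M +
              ((List.range ((pvRow video i).length - (M+1))).map
                (fun t => pvF video i (M + 1 + t))).sum :=
        pv_sum_range_split (pvF video i) k M (pvRow video i).length hkM (by omega) hzero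
      rw [hsplit]
      ring

theorem pv_G'_zero_row (video : List String) (i j : Nat) (h : i = 0 ∨ video.length - 1 ≤ i) :
    pvG' video i j = 0 := by
  unfold pvG'
  refine if_neg (fun hC => ?_)
  obtain ⟨h1, h2, _⟩ := hC
  omega

theorem pv_G'_zero_col (video : List String) (i j : Nat)
    (h : j = 0 ∨ (pvRow video i).length - 1 ≤ j) : pvG' video i j = 0 := by
  unfold pvG'
  refine if_neg (fun hC => ?_)
  obtain ⟨_, _, h3, h4, _⟩ := hC
  omega

-- pvF at p is pvG' at column p+1 (for a row index with valid vertical bounds)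
theorem pvF_eq_G' (video : List String) (i p : Nat) (h1 : 1 ≤ i) (h2 : i + 1 < video.length) :
    pvF video i p = pvG' video i (p + 1) := by
  unfold pvF pvG'
  by_cases hc : ("###".toList <+: (pvRow video i).drop p) ∧
      (pvRow video (i-1)).getD (p+1) ' ' = '#' ∧ (pvRow video (i+1)).getD (p+1) ' ' = '#'
  · obtain ⟨hocc, hu, hd⟩ := hc
    obtain ⟨hl, c0, c1, c2⟩ := (pv_occ_iff _ p).mp hocc
    rw [if_pos ⟨hocc, hu, hd⟩, if_pos ?_]
    · push_cast; ring
    · exact ⟨h1, h2, by omega, by omega, c1, hu, hd, by simpa using c0, c2⟩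
  · rw [if_neg hc, if_neg ?_]
    rintro ⟨_, _, g3, g4, g5, g6, g7, g8, g9⟩
    refine hc ⟨(pv_occ_iff _ p).mpr ⟨by omega, by simpa using g8, g5, g9⟩, g6, g7⟩

theorem pv_foldl_body {α : Type} (l : List α) (g : Int → α → Int) (f : α → Int) (init : Int)
    (h : ∀ (total : Int) (x : α), x ∈ l → g total x = total + f x) :
    l.foldl g init = init + (l.map f).sum := by
  induction l generalizing init with
  | nil => simp
  | cons x xs ih =>
    rw [List.foldl_cons, h init x (by simp), List.map_cons, List.sum_cons,
      ih _ (fun total y hy => h total y (by simp [hy]))]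
    ring

theorem pvF_zero_tail (video : List String) (i t : Nat)
    (ht : (pvRow video i).length - 2 ≤ t) : pvF video i t = 0 := by
  unfold pvF
  refine if_neg (fun hc => ?_)
  have := (pv_occ_iff (pvRow video i) t).mp hc.1
  omega

theorem pv_alt_eq_S' (video : List String) : compute_alignment_alt video = pvS' video := by
  unfold compute_alignment_alt
  rw [PySem.List.len_eq, PySem.List.pyRange_one,
    show ((video.length : Int) - 1 - 1).toNat = video.length - 2 from by omega,
    List.foldl_map]
  have hbody : ∀ (total : Int) (k : Nat), k ∈ List.range (video.length - 2) →
      (fun total (i : Int) =>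
        pvScanRow (PySem.List.pyGetD video i "").toList
          (PySem.List.pyGetD video (i - 1) "").toList
          (PySem.List.pyGetD video (i + 1) "").toList i
          ((PySem.List.pyGetD video i "").toList.length + 1)
          (PySem.Chars.find (PySem.List.pyGetD video i "").toList "###".toList) total)
        total (1 + (k : Int))
      = total + ((List.range ((pvRow video (k+1)).length)).map
          (fun t => pvF video (k+1) t)).sum := by
    intro total k hk
    rw [List.mem_range] at hk
    simp only
    rw [show (1 + (k : Int)) = (((k + 1 : Nat)) : Int) from by omega,
      show (((k + 1 : Nat)) : Int) - 1 = ((k : Nat) : Int) from by omega,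
      show (((k + 1 : Nat)) : Int) + 1 = (((k + 2 : Nat)) : Int) from by omega]
    simp only [PySem.List.pyGetD_natCast]
    have hfind : PySem.Chars.find (video.getD (k+1) "").toList "###".toList
        = PySem.Chars.findFrom (pvRow video (k+1)) "###".toList ((0 : Nat) : Int) := by
      rw [show ((0 : Nat) : Int) = (0 : Int) from rfl, PySem.Chars.findFrom_zero]
      rfl
    rw [hfind]
    have := pvScanRow_eq video (k+1) ((pvRow video (k+1)).length + 1) 0 total
      (Nat.zero_le _) (by omega)
    simp only [Nat.sub_zero, Nat.zero_add] at this
    simpa [pvRow] using this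
  rw [pv_foldl_body _ _ (fun k => ((List.range ((pvRow video (k+1)).length)).map
        (fun t => pvF video (k+1) t)).sum) 0 hbody, zero_add]
  unfold pvS'
  rw [pv_sum_range_shift1 (fun i => ((List.range (pvRow video i).length).map
      (fun j => pvG' video i j)).sum) video.length
    (List.sum_eq_zero (fun x hx => by
      simp only [List.mem_map] at hx
      obtain ⟨j, _, rfl⟩ := hx
      exact pv_G'_zero_row video 0 j (Or.inl rfl)))
    (fun i hi => List.sum_eq_zero (fun x hx => by
      simp only [List.mem_map] at hx
      obtain ⟨j, _, rfl⟩ := hx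
      exact pv_G'_zero_row video i j (Or.inr hi)))]
  refine congrArg _ (List.map_congr_left ?_)
  intro k hk
  rw [List.mem_range] at hk
  rw [pv_sum_range_trunc (fun t => pvF video (k+1) t) _ ((pvRow video (k+1)).length - 2)
      (by omega) (fun t ht => pvF_zero_tail video (k+1) t ht)]
  rw [pv_sum_range_shift1 (fun j => pvG' video (k+1) j) ((pvRow video (k+1)).length)
    (pv_G'_zero_col video (k+1) 0 (Or.inl rfl))
    (fun j hj => pv_G'_zero_col video (k+1) j (Or.inr hj))]
  refine congrArg _ (List.map_congr_left ?_)
  intro t ht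
  rw [List.mem_range] at ht
  exact pvF_eq_G' video (k+1) t (by omega) (by omega)

theorem pv_col_getD (video : List String) (j t : Nat) (ht : t < video.length) :
    (video.map (fun s => s.toList.getD j ' ')).getD t ' '
      = (video.getD t "").toList.getD j ' ' := by
  rw [List.getD_eq_getElem _ _ (by simpa using ht), List.getElem_map,
    List.getD_eq_getElem video "" ht]

theorem pv_col_iff (video : List String) (i j : Nat) (h1 : 1 ≤ i) :
    ("###".toList <+: (video.map (fun s => s.toList.getD j ' ')).drop (i - 1)) ↔
      (i + 1 < video.length ∧ pvC video (i-1) j ∧ pvC video i j ∧ pvC video (i+1) j) := by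
  rw [pv_occ_iff, List.length_map,
    show i - 1 + 1 = i from by omega, show i - 1 + 2 = i + 1 from by omega]
  unfold pvC pvRow
  constructor
  · rintro ⟨hl, c0, c1, c2⟩
    exact ⟨hl, by rw [← pv_col_getD video j (i-1) (by omega)]; exact c0,
      by rw [← pv_col_getD video j i (by omega)]; exact c1,
      by rw [← pv_col_getD video j (i+1) hl]; exact c2⟩
  · rintro ⟨hl, c0, c1, c2⟩
    exact ⟨hl, by rw [pv_col_getD video j (i-1) (by omega)]; exact c0,
      by rw [pv_col_getD video j i (by omega)]; exact c1,
      by rw [pv_col_getD video j (i+1) hl]; exact c2⟩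

theorem pv_D_iff (video : List String) :
    D_compute_alignment video ↔
      ∃ i ∈ List.range video.length, ∃ j ∈ List.range (pvRow video i).length,
        pvCondN video i j ∧ (video.length ≤ i + 2 ∨ (pvRow video i).length ≤ j + 2) := by
  unfold D_compute_alignment
  constructor
  · rintro ⟨i, hi, j, hj, h1, h2, hb, hh, hv⟩
    obtain ⟨hl, c0, c1, c2⟩ :=
      (pv_occ_iff (video.getD i "").toList (j - 1)).mp hh
    rw [show j - 1 + 1 = j from by omega] at c1
    rw [show j - 1 + 2 = j + 1 from by omega] at hl c2
    obtain ⟨hip, u0, _, u2⟩ := (pv_col_iff video i j h1).mp hv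
    refine ⟨i, List.mem_range.mpr hi, j, List.mem_range.mpr hj,
      ⟨h1, hip, h2, ?_, c1, u0, u2, c0, c2⟩, hb⟩
    unfold pvRow
    omega
  · rintro ⟨i, hi, j, hj, ⟨h1, h2, h3, h4, c, u, d, l, r⟩, hb⟩
    unfold pvC pvRow at *
    refine ⟨i, List.mem_range.mp hi, j, List.mem_range.mp hj, h1, h3, hb, ?_, ?_⟩
    · exact (pv_occ_iff (video.getD i "").toList (j - 1)).mpr
        ⟨by omega, l, by rw [show j - 1 + 1 = j from by omega]; exact c,
         by rw [show j - 1 + 2 = j + 1 from by omega]; exact r⟩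
    · exact (pv_col_iff video i j h1).mpr ⟨h2, u, c, d⟩

-- A's cell value never exceeds B's
theorem pv_G_le_G' (video : List String) (i j : Nat) : pvG video i j ≤ pvG' video i j := by
  unfold pvG pvG'
  by_cases hc : pvCond video i j
  · rw [if_pos hc, if_pos ?_]
    obtain ⟨c1, c2, c3, c4, cs⟩ := hc
    exact ⟨c1, by omega, c3, by omega, cs⟩
  · rw [if_neg hc]
    by_cases hc' : pvCondN video i j
    · rw [if_pos hc']
      have h1 : (0:Int) ≤ (i:Int) := Int.natCast_nonneg i
      have h2 : (0:Int) ≤ (j:Int) := Int.natCast_nonneg j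
      positivity
    · rw [if_neg hc']

theorem pv_S_eq_S'_of_notD (video : List String) (hnd : ¬ D_compute_alignment video) :
    pvS video = pvS' video := by
  unfold pvS pvS'
  refine congrArg _ (List.map_congr_left ?_)
  intro i hi
  rw [List.mem_range] at hi
  refine congrArg _ (List.map_congr_left ?_)
  intro j hj
  rw [List.mem_range] at hj
  unfold pvG pvG'
  by_cases hc' : pvCondN video i j
  · by_cases hb : i + 2 < video.length ∧ j + 2 < (pvRow video i).length
    · rw [if_pos hc', if_pos ?_]
      obtain ⟨c1, _, c3, _, cs⟩ := hc'
      exact ⟨c1, hb.1, c3, hb.2, cs⟩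
    · exact absurd ((pv_D_iff video).mpr
        ⟨i, List.mem_range.mpr hi, j, List.mem_range.mpr hj, hc', by omega⟩) hnd
  · rw [if_neg hc', if_neg ?_]
    rintro ⟨c1, c2, c3, c4, cs⟩
    exact hc' ⟨c1, by omega, c3, by omega, cs⟩

theorem pv_sum_lt {α : Type} (l : List α) (f g : α → Int)
    (hle : ∀ x ∈ l, f x ≤ g x) (x0 : α) (hx0 : x0 ∈ l) (hlt : f x0 < g x0) :
    (l.map f).sum < (l.map g).sum := by
  induction l with
  | nil => cases hx0
  | cons y ys ih =>
    simp only [List.map_cons, List.sum_cons]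
    rcases List.mem_cons.mp hx0 with rfl | hmem
    · exact add_lt_add_of_lt_of_le hlt
        (List.sum_le_sum (fun x hx => hle x (List.mem_cons_of_mem _ hx)))
    · exact add_lt_add_of_le_of_lt (hle y (List.mem_cons_self))
        (ih (fun x hx => hle x (List.mem_cons_of_mem _ hx)) hmem)

theorem pv_S_lt_S'_of_D (video : List String) (hD : D_compute_alignment video) :
    pvS video < pvS' video := by
  obtain ⟨i, hi, j, hj, hcn, hb⟩ := (pv_D_iff video).mp hD
  rw [List.mem_range] at hi hj
  unfold pvS pvS'
  refine pv_sum_lt _ _ _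
    (fun x hx => List.sum_le_sum (fun y _ => pv_G_le_G' video x y))
    i (List.mem_range.mpr hi) ?_
  refine pv_sum_lt _ _ _ (fun y _ => pv_G_le_G' video i y) j (List.mem_range.mpr hj) ?_
  unfold pvG pvG'
  rw [if_pos hcn, if_neg (fun hc => by obtain ⟨_, c2, _, c4, _⟩ := hc; omega)]
  obtain ⟨c1, _, c3, _⟩ := hcn
  have h1 : (1:Int) ≤ (i:Int) := by exact_mod_cast c1
  have h2 : (1:Int) ≤ (j:Int) := by exact_mod_cast c3
  nlinarith

-- ===== VERDICT (by name: the statement is the Claim_ definition above) =====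
theorem compute_alignment_spec : Claim_unchanged_compute_alignment := by
  intro video _ _
  unfold Spec_compute_alignment
  intro hnd
  rw [pv_A_eq_S, pv_alt_eq_S', pv_S_eq_S'_of_notD video hnd]

theorem compute_alignment_changed : Claim_changed_compute_alignment := by
  unfold Claim_changed_compute_alignment; decide

theorem compute_alignment_tight : Claim_exact_compute_alignment := by
  intro video _ _ hD
  rw [pv_A_eq_S, pv_alt_eq_S']
  exact ne_of_lt (pv_S_lt_S'_of_D video hD)
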